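-- pv_equiv track=rewrite | github.com/ahmtkypnr/python | ders-12(egzersiz-3).py | control_metathesis
-- ===== SOURCE A (Python) =====
-- def control_metathesis(w1, w2):
--     a1 = enumerate(w1)
--     a2 = enumerate(w2)
--     tru = 0
--     for t in a1:
--         if(t in a2):
--             tru += 1
--     if(tru==len(w1)-2):
--         return True
--     return False
-- ===== SOURCE B (Python) =====
-- def control_metathesis(w1, w2):
--     count = 0
--     for c1, c2 in zip(w1, w2):
--         if c1 != c2:
--             break
--         count += 1
--     return count == len(w1) - 2
-- ===== Notes on version B (the rewrite author's own statement) =====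
-- stated objective: faster
-- what changed: Replaces A's consumed-enumerate-iterator membership trick (a full pass over w1 probing w2's iterator) with a direct zip loop that counts the common prefix and breaks at the first mismatch, then the same == len(w1)-2 test.
import Mathlib
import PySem

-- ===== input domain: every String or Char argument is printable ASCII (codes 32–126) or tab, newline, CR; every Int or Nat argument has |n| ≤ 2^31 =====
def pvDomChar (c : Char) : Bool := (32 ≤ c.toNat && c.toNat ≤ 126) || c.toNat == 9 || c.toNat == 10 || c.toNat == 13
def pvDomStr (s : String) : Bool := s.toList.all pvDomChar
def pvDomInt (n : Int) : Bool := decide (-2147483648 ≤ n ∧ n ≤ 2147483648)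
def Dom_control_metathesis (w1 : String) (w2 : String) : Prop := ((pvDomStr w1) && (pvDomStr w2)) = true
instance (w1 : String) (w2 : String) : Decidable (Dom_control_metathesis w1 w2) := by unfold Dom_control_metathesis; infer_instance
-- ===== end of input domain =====

-- B replaces A's consumed-iterator membership trick with a direct early-terminating
-- common-prefix count (simpler decomposition; same result, return value only).

-- ===== PORT A =====
-- `t in a2` on an ITERATOR consumes it until an equal element is found (rest remains)
-- or it is exhausted (none); this helper models exactly that.
def pvConsume (t : Int × Char) : List (Int × Char) → Option (List (Int × Char))
  | [] => none
  | x :: xs => if x = t then some xs else pvConsume t xs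

def control_metathesis (w1 : String) (w2 : String) : Bool :=
  let a1 := PySem.List.enumerate w1.toList 0
  let a2 := PySem.List.enumerate w2.toList 0
  let st := a1.foldl (fun (s : List (Int × Char) × Int) t =>
      match pvConsume t s.1 with
      | some rest => (rest, s.2 + 1)
      | none => ([], s.2)) (a2, 0)
  decide (st.2 = (w1.toList.length : Int) - 2)

-- ===== PORT B =====
-- count of aligned equal leading characters, breaking on first mismatch (the zip loop)
def pvPrefLen : List Char → List Char → Int
  | a :: as, b :: bs => if a = b then pvPrefLen as bs + 1 else 0
  | _, _ => 0

def control_metathesis_alt (w1 : String) (w2 : String) : Bool :=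
  decide (pvPrefLen w1.toList w2.toList = (w1.toList.length : Int) - 2)

-- ===== PRECONDITION & SPEC =====
def Spec_control_metathesis (w1 : String) (w2 : String) (out : Bool) : Prop := out = control_metathesis_alt w1 w2
instance (w1 : String) (w2 : String) (out : Bool) : Decidable (Spec_control_metathesis w1 w2 out) := by unfold Spec_control_metathesis; infer_instance

-- ===== CLAIM (what is proved, stated in full; the proofs are below) =====
def Claim_equal_control_metathesis : Prop := ∀ (w1 : String) (w2 : String), Dom_control_metathesis w1 w2 → Spec_control_metathesis w1 w2 (control_metathesis w1 w2)

-- ===== LEMMAS AND PROOFS =====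

theorem pvConsume_eq_none_of_not_mem (t : Int × Char) (l : List (Int × Char))
    (h : t ∉ l) : pvConsume t l = none := by
  induction l with
  | nil => rfl
  | cons x xs ih =>
    simp only [List.mem_cons, not_or] at h
    simp only [pvConsume]
    rw [if_neg (fun he => h.1 he.symm), ih h.2]

theorem pv_foldl_dead (l : List (Int × Char)) (acc : Int) :
    (l.foldl (fun (s : List (Int × Char) × Int) t =>
      match pvConsume t s.1 with
      | some rest => (rest, s.2 + 1)
      | none => ([], s.2)) (([] : List (Int × Char)), acc)).2 = acc := by
  induction l generalizing acc with
  | nil => rfl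
  | cons x xs ih => simpa [List.foldl, pvConsume] using ih acc

theorem pv_fold_prefLen (l1 l2 : List Char) (s acc : Int) :
    (List.foldl (fun (st : List (Int × Char) × Int) t =>
      match pvConsume t st.1 with
      | some rest => (rest, st.2 + 1)
      | none => ([], st.2)) (PySem.List.enumerate l2 s, acc)
      (PySem.List.enumerate l1 s)).2 = acc + pvPrefLen l1 l2 := by
  induction l1 generalizing l2 s acc with
  | nil => simp [PySem.List.enumerate_nil, pvPrefLen]
  | cons a as ih =>
    cases l2 with
    | nil =>
      simp only [PySem.List.enumerate_nil, PySem.List.enumerate_cons, List.foldl,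
        pvConsume, pvPrefLen]
      simpa using pv_foldl_dead (PySem.List.enumerate as (s + 1)) acc
    | cons b bs =>
      by_cases hab : a = b
      · subst hab
        simp only [PySem.List.enumerate_cons, List.foldl, pvConsume, if_true,
          pvPrefLen]
        rw [ih bs (s + 1) (acc + 1)]
        ring
      · have hne : ((s, b) : Int × Char) ≠ (s, a) := by
          intro h; injection h with h1 h2; exact hab h2.symm
        have hnm : ((s, a) : Int × Char) ∉ PySem.List.enumerate bs (s + 1) := by
          intro hm
          rcases (PySem.List.mem_enumerate_iff _ _ _).1 hm with ⟨k, hk, hp⟩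
          have h1 : s = s + 1 + (k : Int) := congrArg Prod.fst hp
          omega
        simp only [PySem.List.enumerate_cons, List.foldl, pvConsume, if_neg hne,
          pvConsume_eq_none_of_not_mem _ _ hnm, pvPrefLen, if_neg hab]
        simpa using pv_foldl_dead (PySem.List.enumerate as (s + 1)) acc

-- ===== VERDICT (by name: the statement is the Claim_ definition above) =====
theorem control_metathesis_spec : Claim_equal_control_metathesis := by
  intro w1 w2 _
  unfold Spec_control_metathesis control_metathesis control_metathesis_alt
  have h := pv_fold_prefLen w1.toList w2.toList 0 0
  simp only [h, zero_add]
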